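-- pv_equiv track=rewrite | github.com/jiyoon127/algorithm_study | Greedy/무지의_먹방_라이브.py | solution
-- ===== SOURCE A (Python) =====
-- import heapq
--
-- def solution(food_times, k):
--     if sum(food_times) <= k: return -1
--
--     ate, prev = 0, 0
--     food_kind = len(food_times)
--     q = []
--
--     for i in range(food_kind):
--         heapq.heappush(q, (food_times[i], i+1))
--     while ate + (q[0][0] - prev) * food_kind <= k:
--         now = heapq.heappop(q)[0]
--         ate += (now - prev) * food_kind
--         food_kind -= 1
--         prev = now
--
--     q.sort(key = lambda x:x[1])
--     return q[(k-ate) % food_kind][1]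
-- ===== SOURCE B (Python) =====
-- def solution(food_times, k):
--     if sum(food_times) <= k:
--         return -1
--
--     # how much is eaten in total if every food is eaten min(f, t) times
--     def eaten(t):
--         return sum(f if f <= t else t for f in food_times)
--
--     # binary search for the largest integer threshold t with eaten(t) <= k:
--     # every food with time <= t is finished by second eaten(t); invariant
--     # eaten(lo) <= k < eaten(hi) holds throughout (eaten is nondecreasing).
--     lo = min(k, 0, min(food_times))
--     hi = max(food_times)
--     while hi - lo > 1:
--         mid = (lo + hi) // 2
--         if eaten(mid) <= k:
--             lo = mid
--         else:
--             hi = mid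
--     remaining = [i + 1 for i, f in enumerate(food_times) if f > lo]
--     return remaining[(k - eaten(lo)) % len(remaining)]
-- ===== Notes on version B (the rewrite author's own statement) =====
-- stated objective: alternative
-- what changed: B drops A's heap simulation entirely: it binary-searches the largest integer threshold t with sum(min(f,t) for f in food_times) <= k, then one filter pass over the original list yields the surviving foods in index order and the answer index is (k - eaten(t)) % len(remaining).
-- outside the precondition, e.g. on solution([], -1): A raises IndexError, B raises ValueError
import Mathlib
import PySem

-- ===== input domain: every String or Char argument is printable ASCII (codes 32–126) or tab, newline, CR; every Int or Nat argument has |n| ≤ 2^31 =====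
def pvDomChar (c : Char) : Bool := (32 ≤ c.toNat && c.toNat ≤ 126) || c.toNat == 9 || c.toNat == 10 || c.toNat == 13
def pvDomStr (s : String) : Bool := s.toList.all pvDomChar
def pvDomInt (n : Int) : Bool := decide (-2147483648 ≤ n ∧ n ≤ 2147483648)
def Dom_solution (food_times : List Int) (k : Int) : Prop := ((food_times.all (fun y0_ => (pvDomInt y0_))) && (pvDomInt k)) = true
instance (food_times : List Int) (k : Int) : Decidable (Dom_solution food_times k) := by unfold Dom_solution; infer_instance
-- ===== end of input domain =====

-- B replaces A's heap-popping simulation by a different algorithm: a binary search for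
-- the largest time threshold t with Σ min(f, t) ≤ k, then one filter pass over the
-- original list (objective: alternative — no heap, no sort, no walk in time order).

-- ===== PORT A =====
-- heapq is modelled by an ordered list: heappush = ordered insert under heapq's tuple
-- comparison (lexicographic), heappop = take the head.  This is observationally exact for A:
-- A only reads q[0] (the heap minimum), heappop(q) (removes the minimum; all tuples are
-- distinct since the second components are distinct indices), and finally q.sort on a key
-- (the index) that is injective on q, so the result never depends on the heap's internal layout.

-- heapq's tuple comparison (t1, i1) < (t2, i2), lexicographic
def pvLex (a b : Int × Int) : Bool := decide (a.1 < b.1 ∨ (a.1 = b.1 ∧ a.2 < b.2))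

-- heapq.heappush(q, x)
def pvHeappush (q : List (Int × Int)) (x : Int × Int) : List (Int × Int) :=
  PySem.List.insertBy pvLex x q

-- the while loop: state (q, ate, prev, food_kind); heappop = uncons.
-- The [] branch is a totality guard only: in Python an empty q raises IndexError at q[0],
-- which under Pre_solution never happens (the loop stops before exhausting q since sum > k).
def pvLoopA (k : Int) : List (Int × Int) → Int → Int → Int → (List (Int × Int) × Int × Int × Int)
  | [], ate, prev, fk => ([], ate, prev, fk)
  | (t, i) :: rest, ate, prev, fk =>
    if ate + (t - prev) * fk ≤ k then pvLoopA k rest (ate + (t - prev) * fk) t (fk - 1)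
    else ((t, i) :: rest, ate, prev, fk)

def solution (food_times : List Int) (k : Int) : Int :=
  if food_times.sum ≤ k then -1
  else
    let food_kind : Int := food_times.length
    let q := (PySem.List.pyRange 0 food_kind 1).foldl
      (fun q i => pvHeappush q (PySem.List.pyGetD food_times i 0, i + 1)) []
    match pvLoopA k q 0 0 food_kind with
    | (q', ate, _prev, fk) =>
      let qs := PySem.List.sorted q' (fun p => p.2) false
      -- q[(k-ate) % food_kind][1]; the default of pyGetD is never read under Pre_solution
      (PySem.List.pyGetD qs (PySem.Int.mod (k - ate) fk) (0, 0)).2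

-- ===== PORT B =====
-- eaten(t) = sum(f if f <= t else t for f in food_times)
def pvEaten (ft : List Int) (t : Int) : Int :=
  (ft.map (fun f => if f ≤ t then f else t)).sum

-- the while loop of the binary search (state (lo, hi); returns the final lo)
def pvBSearch (ft : List Int) (k lo hi : Int) : Int :=
  if h : 1 < hi - lo then
    let mid := PySem.Int.floordiv (lo + hi) 2
    if pvEaten ft mid ≤ k then pvBSearch ft k mid hi else pvBSearch ft k lo mid
  else lo
termination_by (hi - lo).toNat
decreasing_by
  · rw [PySem.Int.floordiv_eq_ediv_of_pos (by omega : (0:Int) < 2)]; omega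
  · rw [PySem.Int.floordiv_eq_ediv_of_pos (by omega : (0:Int) < 2)]; omega

def solution_alt (food_times : List Int) (k : Int) : Int :=
  if food_times.sum ≤ k then -1
  else
    -- lo = min(k, 0, min(food_times)); the .getD 0 defaults are unreachable under
    -- Pre_solution (here food_times ≠ [], since sum > k forces it when [] → 0 ≤ k)
    let lo0 := min k (min 0 ((PySem.List.min? food_times (fun x => x)).getD 0))
    let hi0 := (PySem.List.max? food_times (fun x => x)).getD 0
    let lo := pvBSearch food_times k lo0 hi0
    let remaining := ((PySem.List.enumerate food_times).filter
        (fun p => decide (lo < p.2))).map (fun p => p.1 + 1)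
    PySem.List.pyGetD remaining (PySem.Int.mod (k - pvEaten food_times lo) (remaining.length : Int)) 0

-- ===== PRECONDITION & SPEC =====
-- Pre_ excludes only the empty food list with k < 0, where Python A raises IndexError at q[0]
-- (and Python B raises ValueError at min(food_times)); on every other input A returns normally.
def Pre_solution (food_times : List Int) (k : Int) : Prop := food_times = [] → 0 ≤ k
instance (food_times : List Int) (k : Int) : Decidable (Pre_solution food_times k) := by
  unfold Pre_solution; infer_instance

def pvWitness_solution : List Int × Int := ([3, 1, 2], 5)

def Spec_solution (food_times : List Int) (k : Int) (out : Int) : Prop := out = solution_alt food_times k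
instance (food_times : List Int) (k : Int) (out : Int) : Decidable (Spec_solution food_times k out) := by unfold Spec_solution; infer_instance

-- ===== CLAIM (what is proved, stated in full; the proofs are below) =====
def Claim_equal_solution : Prop := ∀ (food_times : List Int) (k : Int), Dom_solution food_times k → Pre_solution food_times k → Spec_solution food_times k (solution food_times k)

-- ===== LEMMAS AND PROOFS =====

theorem pvLex_eq_cmp : pvLex = fun a b : Int × Int =>
    (decide (a.1 < b.1) || (!decide (b.1 < a.1) && decide (a.2 < b.2))) := by
  funext a b
  by_cases h1 : a.1 < b.1 <;> by_cases h2 : b.1 < a.1 <;> by_cases h3 : a.2 < b.2 <;>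
    simp [pvLex, h1, h2, h3] <;> omega

-- A's heap after all pushes is exactly the (time, index)-sorted pair list
theorem pv_build_eq (food_times : List Int) :
    (PySem.List.pyRange 0 (food_times.length : Int) 1).foldl
      (fun q i => pvHeappush q (PySem.List.pyGetD food_times i 0, i + 1)) [] =
    PySem.List.sorted2 ((PySem.List.enumerate food_times).map (fun p => (p.2, p.1 + 1)))
      (fun p => p.1) (fun p => p.2) false := by
  rw [PySem.List.enumerate_eq_map_pyRange (d := 0)]
  simp only [PySem.List.sorted2, pvHeappush, pvLex_eq_cmp, List.foldl_map, PySem.List.len_eq]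
  rfl

theorem pv_asymm {a b : Int × Int} (h : pvLex a b = true) : pvLex b a = false := by
  rcases a with ⟨a1, a2⟩; rcases b with ⟨b1, b2⟩
  simp [pvLex] at *; omega

theorem pv_notlt_trans {x y z : Int × Int} (h1 : pvLex x y = true) (h2 : pvLex z y = false) :
    pvLex z x = false := by
  rcases x with ⟨x1, x2⟩; rcases y with ⟨y1, y2⟩; rcases z with ⟨z1, z2⟩
  simp [pvLex] at *; omega

theorem pv_insert_pairwise (x : Int × Int) (acc : List (Int × Int))
    (h : acc.Pairwise (fun a b => pvLex b a = false)) :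
    (PySem.List.insertBy pvLex x acc).Pairwise (fun a b => pvLex b a = false) := by
  induction acc with
  | nil => simp [PySem.List.insertBy]
  | cons y ys ih =>
    rw [List.pairwise_cons] at h
    by_cases hxy : pvLex x y = true
    · rw [show PySem.List.insertBy pvLex x (y :: ys) = x :: y :: ys by
        simp [PySem.List.insertBy, hxy]]
      refine List.pairwise_cons.mpr ⟨?_, List.pairwise_cons.mpr ⟨h.1, h.2⟩⟩
      intro z hz
      rcases List.mem_cons.mp hz with rfl | hz
      · exact pv_asymm hxy
      · exact pv_notlt_trans hxy (h.1 z hz)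
    · rw [show PySem.List.insertBy pvLex x (y :: ys) = y :: PySem.List.insertBy pvLex x ys by
        simp [PySem.List.insertBy, hxy]]
      refine List.pairwise_cons.mpr ⟨?_, ih h.2⟩
      intro z hz
      rcases (PySem.List.mem_insertBy _ _ _ _).mp hz with rfl | hz
      · exact eq_false_of_ne_true hxy
      · exact h.1 z hz

-- ordered-insert builds keep the list lexicographically ordered
theorem pv_foldl_insert_pairwise (xs acc : List (Int × Int))
    (h : acc.Pairwise (fun a b => pvLex b a = false)) :
    (xs.foldl (fun acc x => PySem.List.insertBy pvLex x acc) acc).Pairwise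
      (fun a b => pvLex b a = false) := by
  induction xs generalizing acc with
  | nil => exact h
  | cons x xs ih => exact ih _ (pv_insert_pairwise x acc h)

-- characterisation of A's pop loop on a strictly lex-sorted list:
-- the popped elements P are a prefix, the count is maintained, ate' telescopes,
-- prev' is the last popped time, and the loop stopped for the stated reason
theorem pv_loopA_char (k : Int) (q : List (Int × Int)) (ate prev : Int)
    (q' : List (Int × Int)) (ate' prev' fk : Int)
    (hs : q.Pairwise (fun a b => pvLex a b = true))
    (hr : pvLoopA k q ate prev (q.length : Int) = (q', ate', prev', fk)) :
    ∃ P, q = P ++ q' ∧ fk = (q'.length : Int) ∧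
      ate' = ate + (P.map (fun p => p.1)).sum + prev' * q'.length - prev * q.length ∧
      (P = [] → prev' = prev) ∧
      (P ≠ [] → ate' ≤ k ∧ ∃ P₀ p, P = P₀ ++ [p] ∧ prev' = p.1) ∧
      (∀ h ∈ q'.head?, k < ate' + (h.1 - prev') * (q'.length : Int)) := by
  induction q generalizing ate prev with
  | nil =>
    simp only [pvLoopA, List.length_nil, Nat.cast_zero, Prod.mk.injEq] at hr
    obtain ⟨h1, h2, h3, h4⟩ := hr
    subst h1 h2 h3 h4
    exact ⟨[], rfl, by simp, by simp, fun _ => rfl, by simp, by simp⟩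
  | cons hd rest ih =>
    rcases hd with ⟨t, i⟩
    rw [List.pairwise_cons] at hs
    have hcast : (((t, i) :: rest).length : Int) - 1 = (rest.length : Int) := by simp
    by_cases hc : ate + (t - prev) * (((t, i) :: rest).length : Int) ≤ k
    · rw [pvLoopA, if_pos hc, hcast] at hr
      obtain ⟨P', hsplit, hfk, hate, hPnil, hPne, hstop⟩ :=
        ih (ate + (t - prev) * (((t, i) :: rest).length : Int)) t hs.2 hr
      refine ⟨(t, i) :: P', by simp [hsplit], hfk, ?_, by simp, ?_, hstop⟩
      · have hlen : ((((t, i) :: rest).length : Int)) = (rest.length : Int) + 1 := by simp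
        rw [hate]; simp only [List.map_cons, List.sum_cons]; ring_nf
        rw [hlen]; ring
      · intro _
        by_cases hP' : P' = []
        · subst hP'
          refine ⟨?_, [], (t, i), by simp, hPnil rfl⟩
          have := hPnil rfl
          simp at hsplit
          rw [hate, ← hsplit, this]
          simp at hc ⊢
          omega
        · obtain ⟨hle, P₀, p, hP, hp⟩ := hPne hP'
          exact ⟨hle, (t, i) :: P₀, p, by simp [hP], hp⟩
    · rw [pvLoopA, if_neg hc] at hr
      simp only [Prod.mk.injEq] at hr
      obtain ⟨h1, h2, h3, h4⟩ := hr
      subst h1 h2 h3 h4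
      refine ⟨[], rfl, rfl, by simp, fun _ => rfl, by simp, ?_⟩
      intro h hh
      simp at hh
      subst hh
      simpa using lt_of_not_ge hc

-- pvEaten splits at a threshold separating a list split
theorem pv_eaten_split (P Q : List (Int × Int)) (t : Int)
    (hP : ∀ p ∈ P, p.1 ≤ t) (hQ : ∀ p ∈ Q, t ≤ p.1) :
    ((P ++ Q).map (fun p => if p.1 ≤ t then p.1 else t)).sum
      = (P.map (fun p => p.1)).sum + t * Q.length := by
  rw [List.map_append, List.sum_append]
  congr 1
  · congr 1
    apply List.map_congr_left
    intro p hp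
    simp [hP p hp]
  · induction Q with
    | nil => simp
    | cons x xs ihx =>
      have hx := hQ x (by simp)
      have : ∀ p ∈ xs, t ≤ p.1 := fun p hp => hQ p (by simp [hp])
      by_cases hxt : x.1 ≤ t
      · have : x.1 = t := le_antisymm hxt hx
        simp [this, ihx ‹∀ p ∈ xs, t ≤ p.1›]
        ring
      · simp [hxt, ihx ‹∀ p ∈ xs, t ≤ p.1›]
        ring

-- pvEaten is monotone in the threshold
theorem pv_eaten_mono (ft : List Int) {s t : Int} (h : s ≤ t) :
    pvEaten ft s ≤ pvEaten ft t := by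
  unfold pvEaten
  induction ft with
  | nil => simp
  | cons x xs ih =>
    simp only [List.map_cons, List.sum_cons]
    have : (if x ≤ s then x else s) ≤ (if x ≤ t then x else t) := by
      split_ifs <;> omega
    omega

-- the binary search lands on the largest threshold with pvEaten ≤ k
theorem pv_bsearch_char (ft : List Int) (k : Int) : ∀ (lo hi : Int),
    pvEaten ft lo ≤ k → k < pvEaten ft hi →
    pvEaten ft (pvBSearch ft k lo hi) ≤ k ∧ k < pvEaten ft (pvBSearch ft k lo hi + 1) := by
  intro lo hi hlo hhi
  fun_induction pvBSearch ft k lo hi with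
  | case1 lo hi h mid hmid ih => exact ih hmid hhi
  | case2 lo hi h mid hmid ih => exact ih hlo (lt_of_not_ge hmid)
  | case3 lo hi h =>
    refine ⟨hlo, lt_of_lt_of_le hhi (pv_eaten_mono ft (by omega))⟩

-- a time threshold between the popped prefix and the remaining suffix gives the same
-- answer slot: used below with the binary-search result
theorem pv_mod_shift (a c m : Int) : PySem.Int.mod (a - c * m) m = PySem.Int.mod a m := by
  unfold PySem.Int.mod
  by_cases hm : m = 0
  · simp [hm]
  · simp

-- pvEaten at a threshold below every food is threshold * length
theorem pv_eaten_const (ft : List Int) (t : Int) (h : ∀ f ∈ ft, t ≤ f) :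
    pvEaten ft t = t * ft.length := by
  unfold pvEaten
  induction ft with
  | nil => simp
  | cons x xs ih =>
    have hx := h x (by simp)
    have hxs := ih (fun f hf => h f (by simp [hf]))
    by_cases hxt : x ≤ t
    · have : x = t := le_antisymm hxt hx
      simp [this, hxs]; ring
    · simp [hxt, hxs]; ring

-- pvEaten at a threshold above every food is the total sum
theorem pv_eaten_total (ft : List Int) (t : Int) (h : ∀ f ∈ ft, f ≤ t) :
    pvEaten ft t = ft.sum := by
  unfold pvEaten
  induction ft with
  | nil => simp
  | cons x xs ih =>
    have hx := h x (by simp)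
    simp [hx, ih (fun f hf => h f (by simp [hf]))]

-- the two ports agree on every input satisfying Pre_solution
theorem pv_ports_eq (food_times : List Int) (k : Int) (hpre : Pre_solution food_times k) :
    solution food_times k = solution_alt food_times k := by
  by_cases hs : food_times.sum ≤ k
  · simp [solution, solution_alt, hs]
  · simp only [solution, solution_alt, if_neg hs]
    have hne : food_times ≠ [] := by
      intro h; subst h; simp at hs; have := hpre rfl; omega
    have hbuild := pv_build_eq food_times
    set L := (PySem.List.enumerate food_times).map (fun p => ((p.2 : Int), p.1 + 1)) with hL
    set pairs := PySem.List.sorted2 L (fun p => p.1) (fun p => p.2) false with hpairs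
    have hperm : pairs.Perm L := PySem.List.sorted2_perm L _ _ false
    have hlen : (pairs.length : Int) = (food_times.length : Int) := by
      rw [hperm.length_eq]
      simp [hL, PySem.List.length_enumerate]
    -- pairs is strictly pvLex-sorted
    have hpairsFold : pairs = L.foldl (fun acc x => PySem.List.insertBy pvLex x acc) [] := by
      rw [hpairs]
      simp only [PySem.List.sorted2, Bool.false_eq_true, if_false, pvLex_eq_cmp]
    have hple : pairs.Pairwise (fun a b => pvLex b a = false) := by
      rw [hpairsFold]; exact pv_foldl_insert_pairwise L [] (by simp)
    have hsnd : pairs.Pairwise (fun a b => a.2 ≠ b.2) := by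
      have h1 : (L.map (fun p : Int × Int => p.2)).Nodup := by
        rw [hL, List.map_map]
        refine List.pairwise_map.mpr (List.Pairwise.imp ?_
          (PySem.List.pairwise_lt_enumerate food_times 0))
        intro a b h
        show (a.1 + 1 : Int) ≠ b.1 + 1
        omega
      have h2 : (pairs.map (fun p : Int × Int => p.2)).Nodup :=
        ((hperm.map (fun p : Int × Int => p.2)).nodup_iff).mpr h1
      exact List.pairwise_map.mp h2
    have hstrict : pairs.Pairwise (fun a b => pvLex a b = true) := by
      refine (hple.and hsnd).imp ?_
      rintro ⟨a1, a2⟩ ⟨b1, b2⟩ ⟨h1, h2⟩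
      simp [pvLex] at *
      omega
    have htimes : pairs.Pairwise (fun a b => a.1 ≤ b.1) := by
      refine hstrict.imp ?_
      rintro ⟨a1, a2⟩ ⟨b1, b2⟩ h
      simp [pvLex] at h
      omega
    -- pvEaten over food_times is the same sum over the pairs' times
    have hE : ∀ t, pvEaten food_times t
        = (pairs.map (fun p => if p.1 ≤ t then p.1 else t)).sum := by
      intro t
      have h1 : (pairs.map (fun p => if p.1 ≤ t then p.1 else t)).sum
          = (L.map (fun p => if p.1 ≤ t then p.1 else t)).sum :=
        (hperm.map (fun p => if p.1 ≤ t then p.1 else t)).sum_eq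
      rw [h1, hL, List.map_map]
      have h2 : ((fun p : Int × Int => if p.1 ≤ t then p.1 else t) ∘
          (fun p : Int × Int => ((p.2 : Int), p.1 + 1)))
          = (fun f : Int => if f ≤ t then f else t) ∘ (fun p : Int × Int => p.2) := rfl
      rw [h2, ← List.map_map, PySem.List.map_snd_enumerate]
      rfl
    have hsum : (pairs.map (fun p => p.1)).sum = food_times.sum := by
      have h1 := (hperm.map (fun p : Int × Int => p.1)).sum_eq
      rw [h1, hL, List.map_map]
      have h2 : ((fun p : Int × Int => p.1) ∘ (fun p : Int × Int => ((p.2 : Int), p.1 + 1)))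
          = (fun p : Int × Int => p.2) := rfl
      rw [h2, PySem.List.map_snd_enumerate]
    have hmem : ∀ f ∈ food_times, ∃ pp ∈ pairs, pp.1 = f := by
      intro f hf
      rw [← PySem.List.map_snd_enumerate food_times 0] at hf
      obtain ⟨e, he, hef⟩ := List.mem_map.mp hf
      exact ⟨((e.2 : Int), e.1 + 1), hperm.mem_iff.mpr (List.mem_map.mpr ⟨e, he, rfl⟩), hef⟩
    -- run A's loop and characterise it
    rw [hbuild, show (food_times.length : Int) = (pairs.length : Int) from hlen.symm]
    rcases hA : pvLoopA k pairs 0 0 (pairs.length : Int) with ⟨q', ate', prev', fk⟩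
    obtain ⟨P, hsplit, hfk, hate, hPnil, hPne, hstop⟩ :=
      pv_loopA_char k pairs 0 0 q' ate' prev' fk hstrict hA
    dsimp only
    -- q' is nonempty
    have hq'ne : q' ≠ [] := by
      intro h
      subst h
      rw [List.append_nil] at hsplit
      rcases eq_or_ne P [] with hP | hP
      · rw [hP] at hsplit
        have h0 : pairs.length = 0 := by rw [hsplit]; rfl
        have h1 : food_times.length = 0 := by omega
        exact hne (List.length_eq_zero_iff.mp h1)
      · have h1 := (hPne hP).1
        have : ate' = food_times.sum := by
          rw [hate, ← hsplit, hsum]; simp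
        omega
    have htPQ : (P ++ q').Pairwise (fun a b : Int × Int => a.1 ≤ b.1) := by
      rw [← hsplit]; exact htimes
    obtain ⟨hd, q'tl, hq'⟩ := List.exists_cons_of_ne_nil hq'ne
    have hhead : hd ∈ q'.head? := by rw [hq']; rfl
    have hq'min : ∀ p ∈ q', hd.1 ≤ p.1 := by
      intro p hp
      rcases List.mem_cons.mp (hq' ▸ hp) with rfl | hp'
      · exact le_refl _
      · have := List.pairwise_append.mp htPQ
        have h2 := this.2.1
        rw [hq'] at h2
        exact (List.pairwise_cons.mp h2).1 p hp'
    have hcross : ∀ p ∈ P, ∀ r ∈ q', p.1 ≤ r.1 := by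
      intro p hp r hr
      exact (List.pairwise_append.mp htPQ).2.2 p hp r hr
    have hstop' := hstop hd hhead
    -- B's binary search bounds
    obtain ⟨m, hm⟩ : ∃ m, PySem.List.min? food_times (fun x => x) = some m := by
      cases h : PySem.List.min? food_times (fun x => x) with
      | none => exact absurd (Iff.mp (PySem.List.min?_eq_none_iff food_times (fun x => x)) h) hne
      | some m => exact ⟨m, rfl⟩
    obtain ⟨M, hM⟩ : ∃ M, PySem.List.max? food_times (fun x => x) = some M := by
      cases h : PySem.List.max? food_times (fun x => x) with
      | none => exact absurd (Iff.mp (PySem.List.max?_eq_none_iff food_times (fun x => x)) h) hne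
      | some M => exact ⟨M, rfl⟩
    have hmmin : ∀ y ∈ food_times, m ≤ y := PySem.List.min?_isMin hm
    have hMmax : ∀ y ∈ food_times, y ≤ M := PySem.List.max?_isMax hM
    rw [hm, hM]
    simp only [Option.getD_some]
    suffices hmain : ∀ lo0 hi0 : Int, pvEaten food_times lo0 ≤ k → k < pvEaten food_times hi0 →
        (PySem.List.pyGetD (PySem.List.sorted q' (fun p => p.2))
            (PySem.Int.mod (k - ate') fk) ((0 : Int), (0 : Int))).2
          = PySem.List.pyGetD
              (((PySem.List.enumerate food_times).filter
                  (fun p => decide (pvBSearch food_times k lo0 hi0 < p.2))).map (fun p => p.1 + 1))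
              (PySem.Int.mod (k - pvEaten food_times (pvBSearch food_times k lo0 hi0))
                ((((PySem.List.enumerate food_times).filter
                    (fun p => decide (pvBSearch food_times k lo0 hi0 < p.2))).map
                      (fun p => p.1 + 1)).length : Int)) 0 by
      refine hmain _ _ ?_ ?_
      · have h1 : pvEaten food_times (min k (min 0 m)) = (min k (min 0 m)) * food_times.length :=
          pv_eaten_const _ _ (fun f hf =>
            le_trans (le_trans (min_le_right _ _) (min_le_right _ _)) (hmmin f hf))
        have h2 : (1 : Int) ≤ food_times.length := by
          have : food_times.length ≠ 0 := fun h => hne (List.length_eq_zero_iff.mp h)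
          omega
        have h3 : (min k (min 0 m)) * (food_times.length : Int) ≤ (min k (min 0 m)) * 1 :=
          mul_le_mul_of_nonpos_left h2
            (le_trans (min_le_right k (min 0 m)) (min_le_left 0 m))
        have h4 : min k (min 0 m) ≤ k := min_le_left _ _
        omega
      · rw [pv_eaten_total _ _ hMmax]
        omega
    intro lo0 hi0 hlo0 hhi0
    obtain ⟨hElo, hElo1⟩ := pv_bsearch_char food_times k lo0 hi0 hlo0 hhi0
    set lo := pvBSearch food_times k lo0 hi0 with hlodef
    -- the three threshold facts
    have hkey : (∀ p ∈ P, p.1 ≤ lo) ∧ (∀ p ∈ q', lo < p.1) ∧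
        pvEaten food_times lo = ate' + (lo - prev') * (q'.length : Int) := by
      rcases eq_or_ne P [] with hP | hP
      · -- nothing popped: prev' = 0, ate' = 0, q' = pairs
        have hprev0 : prev' = 0 := hPnil hP
        have hate0 : ate' = 0 := by
          rw [hate, hP, hprev0]; simp
        rw [hP] at hsplit
        simp only [List.nil_append] at hsplit
        have hq'lo : ∀ p ∈ q', lo < p.1 := by
          by_contra hcon
          push_neg at hcon
          obtain ⟨p, hp, hple'⟩ := hcon
          have h1 : hd.1 ≤ lo := le_trans (hq'min p hp) hple'
          have h2 : pvEaten food_times hd.1 = hd.1 * food_times.length := by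
            refine pv_eaten_const _ _ (fun f hf => ?_)
            obtain ⟨pp, hpp, rfl⟩ := hmem f hf
            exact hq'min pp (hsplit ▸ hpp)
          have h3 := pv_eaten_mono food_times h1
          rw [h2] at h3
          have h4 : k < hd.1 * (q'.length : Int) := by
            have h := hstop hd hhead
            rw [hate0, hprev0] at h
            simpa using h
          rw [← hsplit, hlen] at h4
          omega
        refine ⟨by simp [hP], hq'lo, ?_⟩
        have h5 : pvEaten food_times lo = lo * food_times.length := by
          refine pv_eaten_const _ _ (fun f hf => ?_)
          obtain ⟨pp, hpp, rfl⟩ := hmem f hf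
          exact le_of_lt (hq'lo pp (hsplit ▸ hpp))
        rw [h5, hate0, hprev0, ← hsplit, hlen]
        ring
      · -- something was popped
        obtain ⟨hatele, P₀, pl, hP0, hplval⟩ := hPne hP
        have hPle : ∀ p ∈ P, p.1 ≤ prev' := by
          intro p hp
          rw [hP0] at hp
          rcases List.mem_append.mp hp with hp' | hp'
          · have hPpw : P.Pairwise (fun a b => a.1 ≤ b.1) :=
              (List.pairwise_append.mp htPQ).1
            rw [hP0] at hPpw
            have := (List.pairwise_append.mp hPpw).2.2 p hp' pl (by simp)
            omega
          · simp at hp'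
            subst hp'
            omega
        have hq'ge : ∀ r ∈ q', prev' ≤ r.1 := by
          intro r hr
          have := hcross pl (by rw [hP0]; simp) r hr
          omega
        have hEprev : pvEaten food_times prev' = ate' := by
          rw [hE, hsplit, pv_eaten_split P q' prev' hPle hq'ge, hate]
          simp
        have hprevlo : prev' ≤ lo := by
          by_contra hcon
          push_neg at hcon
          have := pv_eaten_mono food_times (by omega : lo + 1 ≤ prev')
          omega
        have hq'lo : ∀ p ∈ q', lo < p.1 := by
          by_contra hcon
          push_neg at hcon
          obtain ⟨p, hp, hple'⟩ := hcon
          have h1 : hd.1 ≤ lo := le_trans (hq'min p hp) hple'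
          have h2 : pvEaten food_times hd.1
              = (P.map (fun p => p.1)).sum + hd.1 * q'.length := by
            rw [hE, hsplit]
            refine pv_eaten_split P q' hd.1 ?_ hq'min
            intro p' hp'
            exact le_trans (hPle p' hp') (hq'ge hd (by rw [hq']; simp))
          have h3 := pv_eaten_mono food_times h1
          rw [h2] at h3
          have h4 : (P.map (fun p => p.1)).sum + hd.1 * (q'.length : Int)
              = ate' + (hd.1 - prev') * (q'.length : Int) := by
            rw [hate]; simp; ring
          omega
        refine ⟨fun p hp => le_trans (hPle p hp) hprevlo, hq'lo, ?_⟩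
        have h5 : pvEaten food_times lo
            = (P.map (fun p => p.1)).sum + lo * q'.length := by
          rw [hE, hsplit]
          exact pv_eaten_split P q' lo (fun p hp => le_trans (hPle p hp) hprevlo)
            (fun r hr => le_of_lt (hq'lo r hr))
        rw [h5, hate]
        simp
        ring
    obtain ⟨hPlo, hq'lo, hEloeq⟩ := hkey
    -- the surviving pairs are exactly those with time above lo
    have hfilter : pairs.filter (fun p => decide (lo < p.1)) = q' := by
      rw [hsplit, List.filter_append]
      rw [List.filter_eq_nil_iff.mpr (fun p hp => by simpa using not_lt.mpr (hPlo p hp)),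
        List.filter_eq_self.mpr (fun p hp => by simpa using hq'lo p hp)]
      simp
    set ys := ((PySem.List.enumerate food_times).filter
        (fun p => decide (lo < p.2))).map (fun p => ((p.2 : Int), p.1 + 1)) with hys
    have hysL : ys = L.filter (fun p => decide (lo < p.1)) := by
      rw [hys, hL, List.filter_map]
      rfl
    have hysperm : ys.Perm q' := by
      rw [hysL, ← hfilter]
      exact (hperm.filter (fun p => decide (lo < p.1))).symm
    have hyspw : ys.Pairwise (fun a b => a.2 < b.2) := by
      rw [hys]
      refine List.pairwise_map.mpr ?_
      refine ((PySem.List.pairwise_lt_enumerate food_times 0).filter _).imp ?_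
      intro a b h
      simpa using by omega
    have hsorted : PySem.List.sorted q' (fun p => p.2) false = ys :=
      PySem.List.sorted_eq_of_perm_of_pairwise_lt q' ys (fun p => p.2) hysperm hyspw
    have hrem : ((PySem.List.enumerate food_times).filter
        (fun p => decide (lo < p.2))).map (fun p => ((p.1 : Int) + 1)) =
        ys.map (fun p => p.2) := by
      rw [hys, List.map_map]
      rfl
    simp only [hsorted, hrem]
    have hlenys : ((ys.map (fun p : Int × Int => p.2)).length : Int) = fk := by
      rw [List.length_map, hysperm.length_eq, hfk]
    rw [hlenys]
    have hidx : PySem.Int.mod (k - pvEaten food_times lo) fk = PySem.Int.mod (k - ate') fk := by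
      have : k - pvEaten food_times lo = (k - ate') - (lo - prev') * fk := by
        rw [hEloeq, hfk]; ring
      rw [this, pv_mod_shift]
    rw [hidx]
    exact (PySem.List.pyGetD_map (fun p : Int × Int => p.2) ys
      (PySem.Int.mod (k - ate') fk) ((0 : Int), (0 : Int))).symm

-- ===== VERDICT (by name: the statement is the Claim_ definition above) =====
theorem solution_spec : Claim_equal_solution := by
  intro food_times k _ hpre
  unfold Spec_solution
  exact pv_ports_eq food_times k hpre
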